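-- pv_equiv track=rewrite | github.com/goulinkh/advent-of-code | day-05/day1-part1.py | draw_diagram
-- ===== SOURCE A (Python) =====
-- def draw_diagram(lines):
--     # Leave horizontal and verticals only
--     h_and_v_only = filter(
--         lambda line: line[0]["x"] == line[1]["x"]
--         or line[0]["y"] == line[1]["y"],
--         lines,
--     )
--     lines = list(h_and_v_only)
--     # Find diagram's size
--     diagram_size = 0
--     for line in lines:
--         diagram_size = max(
--             diagram_size,
--             line[0]["x"],
--             line[0]["y"],
--             line[1]["x"],
--             line[1]["y"],
--         )
--     # Fill the diagram with zeros
--     diagram = []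
--     for _ in range(diagram_size + 1):
--         diagram_line = []
--         for __ in range(diagram_size + 1):
--             diagram_line.append(0)
--         diagram.append(diagram_line)
--     for line in lines:
--         # Normalize all the cases
--         left, right = line[0], line[1]
--         same_x = left["x"] == right["x"]
--         if same_x and left["y"] > right["y"]:
--             t = left
--             left = right
--             right = t
--         elif not same_x and left["x"] > right["x"]:
--             t = left
--             left = right
--             right = t
--         # Fill vertically
--         # 7,0 -> 7,4
--         # 9,4 -> 3,4
--
--         if same_x:
--             for i in range(left["y"], right["y"] + 1):
--                 diagram[i][left["x"]] += 1
--         # Fill horizontally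
--         else:
--             for i in range(left["x"], right["x"] + 1):
--                 diagram[left["y"]][i] += 1
--     return diagram
-- ===== SOURCE B (Python) =====
-- def draw_diagram(lines):
--     segs = [l for l in lines if l[0]["x"] == l[1]["x"] or l[0]["y"] == l[1]["y"]]
--     size = max([0] + [c for l in segs for p in (l[0], l[1]) for c in (p["x"], p["y"])])
--
--     def covers(l, x, y):
--         x0, y0, x1, y1 = l[0]["x"], l[0]["y"], l[1]["x"], l[1]["y"]
--         if x0 == x1:
--             return x == x0 and min(y0, y1) <= y <= max(y0, y1)
--         return y == y0 and min(x0, x1) <= x <= max(x0, x1)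
--
--     return [[sum(1 for l in segs if covers(l, x, y)) for x in range(size + 1)]
--             for y in range(size + 1)]
-- ===== Notes on version B (the rewrite author's own statement) =====
-- stated objective: alternative
-- what changed: Inverts the computation: instead of painting each segment into a zero-initialized grid mutated in place (with swap-then-range normalization), B computes every cell's value directly by counting, per cell, how many kept segments geometrically cover it (a per-cell interval-membership query), with no grid mutation and no per-segment range walk.
-- outside the precondition, e.g. on draw_diagram([[{'x': 0, 'y': -1}, {'x': 0, 'y': 0}]]): A returns [[2]], B returns [[1]]
import Mathlib
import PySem

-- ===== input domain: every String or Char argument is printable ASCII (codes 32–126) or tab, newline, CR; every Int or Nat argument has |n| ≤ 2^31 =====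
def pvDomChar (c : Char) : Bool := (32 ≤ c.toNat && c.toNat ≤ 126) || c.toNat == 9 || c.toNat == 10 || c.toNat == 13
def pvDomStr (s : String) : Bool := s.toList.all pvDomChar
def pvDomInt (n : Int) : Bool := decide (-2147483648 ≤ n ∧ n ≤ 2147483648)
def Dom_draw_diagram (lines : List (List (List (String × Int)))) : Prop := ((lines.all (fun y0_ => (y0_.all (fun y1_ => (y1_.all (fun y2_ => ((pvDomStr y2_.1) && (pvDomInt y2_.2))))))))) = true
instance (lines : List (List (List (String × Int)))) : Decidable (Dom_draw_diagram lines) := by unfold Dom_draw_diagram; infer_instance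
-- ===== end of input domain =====

-- B inverts A's computation: instead of painting each segment into a zero-initialized grid mutated
-- in place, it computes each cell's value by counting the kept segments that cover it (objective: alternative).


-- shared helpers: point["k"] is a first-match dict lookup; line[i] is Python list indexing
-- (the 0-defaults are never reached under Pre_draw_diagram)
def pvKey (p : List (String × Int)) (k : String) : Int := (PySem.Dict.mk p).getD k 0
def pvPt (line : List (List (String × Int))) (i : Int) : List (String × Int) := PySem.List.pyGetD line i []
def pvC (line : List (List (String × Int))) (i : Int) (k : String) : Int := pvKey (pvPt line i) k
def pvKept (line : List (List (String × Int))) : Bool :=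
  (pvC line 0 "x" == pvC line 1 "x") || (pvC line 0 "y" == pvC line 1 "y")

-- ===== PORT A =====
def draw_diagram (lines : List (List (List (String × Int)))) : List (List Int) :=
  let lines2 := lines.filter pvKept
  let diagram_size := lines2.foldl (fun s line =>
    max (max (max (max s (pvC line 0 "x")) (pvC line 0 "y")) (pvC line 1 "x")) (pvC line 1 "y")) 0
  let diagram := (PySem.List.pyRange 0 (diagram_size + 1) 1).foldl
    (fun dg _ => dg ++ [(PySem.List.pyRange 0 (diagram_size + 1) 1).foldl (fun row _ => row ++ [(0 : Int)]) []]) []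
  lines2.foldl (fun dg line =>
    let left := pvPt line 0
    let right := pvPt line 1
    let same_x := pvKey left "x" == pvKey right "x"
    let lr :=
      if same_x && decide (pvKey left "y" > pvKey right "y") then (right, left)
      else if (!same_x) && decide (pvKey left "x" > pvKey right "x") then (right, left)
      else (left, right)
    if same_x then
      (PySem.List.pyRange (pvKey lr.1 "y") (pvKey lr.2 "y" + 1) 1).foldl
        (fun dg i =>
          PySem.List.pySetD dg i
            (PySem.List.pySetD (PySem.List.pyGetD dg i []) (pvKey lr.1 "x")
              (PySem.List.pyGetD (PySem.List.pyGetD dg i []) (pvKey lr.1 "x") 0 + 1))) dg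
    else
      (PySem.List.pyRange (pvKey lr.1 "x") (pvKey lr.2 "x" + 1) 1).foldl
        (fun dg i =>
          PySem.List.pySetD dg (pvKey lr.1 "y")
            (PySem.List.pySetD (PySem.List.pyGetD dg (pvKey lr.1 "y") []) i
              (PySem.List.pyGetD (PySem.List.pyGetD dg (pvKey lr.1 "y") []) i 0 + 1))) dg) diagram

-- ===== PORT B =====
-- covers(l, x, y): does the (horizontal or vertical) segment l pass through cell (x, y)?
def pvCovers (l : List (List (String × Int))) (x y : Int) : Bool :=
  if pvC l 0 "x" == pvC l 1 "x" then
    (x == pvC l 0 "x") && decide (min (pvC l 0 "y") (pvC l 1 "y") ≤ y) &&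
      decide (y ≤ max (pvC l 0 "y") (pvC l 1 "y"))
  else
    (y == pvC l 0 "y") && decide (min (pvC l 0 "x") (pvC l 1 "x") ≤ x) &&
      decide (x ≤ max (pvC l 0 "x") (pvC l 1 "x"))

def draw_diagram_alt (lines : List (List (List (String × Int)))) : List (List Int) :=
  let segs := lines.filter pvKept
  let size := PySem.List.maxD
    ((0 : Int) :: segs.flatMap (fun l => [pvC l 0 "x", pvC l 0 "y", pvC l 1 "x", pvC l 1 "y"]))
    (fun c => c) 0
  (PySem.List.pyRange 0 (size + 1) 1).map (fun y =>
    (PySem.List.pyRange 0 (size + 1) 1).map (fun x =>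
      segs.foldl (fun acc l => if pvCovers l x y then acc + 1 else acc) (0 : Int)))

-- ===== PRECONDITION & SPEC =====
def pvHasKey (p : List (String × Int)) (k : String) : Bool := p.any (fun q => q.1 == k)
-- Pre_ excludes inputs where A raises (a line without two points or without an "x"/"y" key, and most
-- negative coordinates on a horizontal/vertical line: IndexError), together with the remaining
-- negative-coordinate inputs on horizontal/vertical lines — coordinates are nonnegative in this
-- puzzle's natural domain, and there A's value comes from negative-index wraparound.
def Pre_draw_diagram (lines : List (List (List (String × Int)))) : Prop :=
  ∀ line ∈ lines, 2 ≤ line.length ∧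
    pvHasKey (pvPt line 0) "x" = true ∧ pvHasKey (pvPt line 0) "y" = true ∧
    pvHasKey (pvPt line 1) "x" = true ∧ pvHasKey (pvPt line 1) "y" = true ∧
    (pvKept line = true →
      0 ≤ pvC line 0 "x" ∧ 0 ≤ pvC line 0 "y" ∧ 0 ≤ pvC line 1 "x" ∧ 0 ≤ pvC line 1 "y")
instance (lines : List (List (List (String × Int)))) : Decidable (Pre_draw_diagram lines) := by
  unfold Pre_draw_diagram; infer_instance

def pvWitness_draw_diagram : (List (List (List (String × Int)))) :=
  [[[("x", 0), ("y", 0)], [("x", 0), ("y", 1)]],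
   [[("x", 2), ("y", 1)], [("x", 0), ("y", 1)]]]

def Spec_draw_diagram (lines : List (List (List (String × Int)))) (out : List (List Int)) : Prop :=
  out = draw_diagram_alt lines
instance (lines : List (List (List (String × Int)))) (out : List (List Int)) : Decidable (Spec_draw_diagram lines out) := by
  unfold Spec_draw_diagram; infer_instance

-- ===== CLAIM (what is proved, stated in full; the proofs are below) =====
def Claim_equal_draw_diagram : Prop := ∀ (lines : List (List (List (String × Int)))), Dom_draw_diagram lines → Pre_draw_diagram lines → Spec_draw_diagram lines (draw_diagram lines)

-- ===== LEMMAS AND PROOFS =====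

-- the list of grid cells covered by a kept (horizontal or vertical) line
def pvCells (l : List (List (String × Int))) : List (Int × Int) :=
  if pvC l 0 "x" = pvC l 1 "x" then
    (PySem.List.pyRange (min (pvC l 0 "y") (pvC l 1 "y")) (max (pvC l 0 "y") (pvC l 1 "y") + 1) 1).map
      (fun y => (pvC l 0 "x", y))
  else
    (PySem.List.pyRange (min (pvC l 0 "x") (pvC l 1 "x")) (max (pvC l 0 "x") (pvC l 1 "x") + 1) 1).map
      (fun x => (x, pvC l 0 "y"))

-- A's single-cell increment diagram[c.2][c.1] += 1
def pvInc (dg : List (List Int)) (c : Int × Int) : List (List Int) :=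
  PySem.List.pySetD dg c.2
    (PySem.List.pySetD (PySem.List.pyGetD dg c.2 []) c.1
      (PySem.List.pyGetD (PySem.List.pyGetD dg c.2 []) c.1 0 + 1))

def pvVal (dg : List (List Int)) (x y : Int) : Int :=
  PySem.List.pyGetD (PySem.List.pyGetD dg y []) x 0

def pvWF (n : Nat) (dg : List (List Int)) : Prop :=
  dg.length = n ∧ ∀ r ∈ dg, r.length = n

def pvFlat (segs : List (List (List (String × Int)))) : List Int :=
  segs.flatMap (fun l => [pvC l 0 "x", pvC l 0 "y", pvC l 1 "x", pvC l 1 "y"])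

theorem pvInc_wf {n : Nat} {dg : List (List Int)} (h : pvWF n dg) {c : Int × Int}
    (h1 : 0 ≤ c.1) (h2 : c.1 < (n : Int)) (h3 : 0 ≤ c.2) (h4 : c.2 < (n : Int)) :
    pvWF n (pvInc dg c) := by
  obtain ⟨hlen, hrows⟩ := h
  have hrow : PySem.List.pyGetD dg c.2 [] ∈ dg :=
    PySem.List.pyGetD_mem dg [] ⟨by omega, by omega⟩
  refine ⟨?_, ?_⟩
  · rw [pvInc, PySem.List.length_pySetD]; exact hlen
  · intro r hr
    rw [pvInc, PySem.List.pySetD_of_nonneg _ _ h3] at hr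
    rcases List.mem_or_eq_of_mem_set hr with h' | h'
    · exact hrows r h'
    · rw [h', PySem.List.length_pySetD]; exact hrows _ hrow

theorem pvInc_val {n : Nat} {dg : List (List Int)} (h : pvWF n dg) {c : Int × Int}
    (h1 : 0 ≤ c.1) (h2 : c.1 < (n : Int)) (h3 : 0 ≤ c.2) (h4 : c.2 < (n : Int))
    {x y : Int} (hx : 0 ≤ x) (hy : 0 ≤ y) :
    pvVal (pvInc dg c) x y = pvVal dg x y + (if (x, y) = c then 1 else 0) := by
  obtain ⟨hlen, hrows⟩ := h
  have hrow : PySem.List.pyGetD dg c.2 [] ∈ dg :=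
    PySem.List.pyGetD_mem dg [] ⟨by omega, by omega⟩
  have hrl : (PySem.List.pyGetD dg c.2 []).length = n := hrows _ hrow
  have e1 : c.1 = ((c.1.toNat : Nat) : Int) := (Int.toNat_of_nonneg h1).symm
  have e2 : c.2 = ((c.2.toNat : Nat) : Int) := (Int.toNat_of_nonneg h3).symm
  have ex : x = ((x.toNat : Nat) : Int) := (Int.toNat_of_nonneg hx).symm
  have ey : y = ((y.toNat : Nat) : Int) := (Int.toNat_of_nonneg hy).symm
  unfold pvInc pvVal
  rw [e2, ey, ex, e1,
    PySem.List.pyGetD_pySetD_natCast _ _ _ _ _ (by omega : c.2.toNat < dg.length)]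
  by_cases hyc : y.toNat = c.2.toNat
  · rw [if_pos hyc, hyc,
      PySem.List.pyGetD_pySetD_natCast _ _ _ _ _
        (show c.1.toNat < (PySem.List.pyGetD dg ((c.2.toNat : Nat) : Int) []).length by
          rw [← e2, hrl]; omega)]
    by_cases hxc : x.toNat = c.1.toNat
    · rw [if_pos hxc, hxc, if_pos (by rw [Prod.ext_iff]; constructor <;> simp <;> omega)]
    · rw [if_neg hxc, if_neg (by intro hh; rw [Prod.ext_iff] at hh; simp at hh; omega), add_zero]
  · rw [if_neg hyc, if_neg (by intro hh; rw [Prod.ext_iff] at hh; simp at hh; omega), add_zero]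

theorem pvFoldl_inc {n : Nat} (cs : List (Int × Int)) (dg : List (List Int)) (h : pvWF n dg)
    (hcs : ∀ c ∈ cs, 0 ≤ c.1 ∧ c.1 < (n : Int) ∧ 0 ≤ c.2 ∧ c.2 < (n : Int)) :
    pvWF n (cs.foldl pvInc dg) ∧
      ∀ x y : Int, 0 ≤ x → 0 ≤ y →
        pvVal (cs.foldl pvInc dg) x y = pvVal dg x y + ((cs.count (x, y) : Nat) : Int) := by
  induction cs generalizing dg with
  | nil => simpa using h
  | cons c cs ih =>
    obtain ⟨hc1, hc2, hc3, hc4⟩ := hcs c (by simp)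
    have hwf' := pvInc_wf h hc1 hc2 hc3 hc4
    obtain ⟨w, v⟩ := ih (pvInc dg c) hwf' (fun c hc => hcs c (by simp [hc]))
    refine ⟨w, fun x y hx hy => ?_⟩
    rw [List.foldl_cons, v x y hx hy, pvInc_val h hc1 hc2 hc3 hc4 hx hy, List.count_cons]
    have hbe : (c == (x, y)) = true ↔ (x, y) = c := by
      rw [beq_iff_eq]; exact eq_comm
    push_cast
    split_ifs with h1 h2 h2
    · ring
    · exact absurd (hbe.mpr h1) h2
    · exact absurd (hbe.mp h2) h1
    · ring

theorem pvStepA_eq (line : List (List (String × Int))) (hk : pvKept line = true)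
    (dg : List (List Int)) :
    (let left := pvPt line 0
     let right := pvPt line 1
     let same_x := pvKey left "x" == pvKey right "x"
     let lr :=
       if same_x && decide (pvKey left "y" > pvKey right "y") then (right, left)
       else if (!same_x) && decide (pvKey left "x" > pvKey right "x") then (right, left)
       else (left, right)
     if same_x then
       (PySem.List.pyRange (pvKey lr.1 "y") (pvKey lr.2 "y" + 1) 1).foldl
         (fun dg i =>
           PySem.List.pySetD dg i
             (PySem.List.pySetD (PySem.List.pyGetD dg i []) (pvKey lr.1 "x")
               (PySem.List.pyGetD (PySem.List.pyGetD dg i []) (pvKey lr.1 "x") 0 + 1))) dg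
     else
       (PySem.List.pyRange (pvKey lr.1 "x") (pvKey lr.2 "x" + 1) 1).foldl
         (fun dg i =>
           PySem.List.pySetD dg (pvKey lr.1 "y")
             (PySem.List.pySetD (PySem.List.pyGetD dg (pvKey lr.1 "y") []) i
               (PySem.List.pyGetD (PySem.List.pyGetD dg (pvKey lr.1 "y") []) i 0 + 1))) dg)
      = (pvCells line).foldl pvInc dg := by
  by_cases hsx : pvC line 0 "x" = pvC line 1 "x"
  · have hb : (pvKey (pvPt line 0) "x" == pvKey (pvPt line 1) "x") = true := by
      simpa [pvC] using hsx
    simp only [hb, Bool.true_and, Bool.not_true, Bool.false_and, Bool.false_eq_true,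
      if_false, if_true]
    by_cases hgt : pvC line 0 "y" > pvC line 1 "y"
    · rw [if_pos (by simpa [pvC] using hgt)]
      dsimp only
      rw [pvCells, if_pos hsx, min_eq_right (by omega), max_eq_left (by omega), hsx,
        List.foldl_map]
      rfl
    · rw [if_neg (by simpa [pvC] using hgt)]
      dsimp only
      rw [pvCells, if_pos hsx, min_eq_left (by omega), max_eq_right (by omega),
        List.foldl_map]
      rfl
  · have hsy : pvC line 0 "y" = pvC line 1 "y" := by
      have := hk
      unfold pvKept at this
      simp only [beq_iff_eq, Bool.or_eq_true] at this
      tauto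
    have hb : (pvKey (pvPt line 0) "x" == pvKey (pvPt line 1) "x") = false := by
      simpa [pvC] using hsx
    simp only [hb, Bool.false_and, Bool.not_false, Bool.true_and, Bool.false_eq_true,
      if_false]
    by_cases hgt : pvC line 0 "x" > pvC line 1 "x"
    · rw [if_pos (by simpa [pvC] using hgt)]
      dsimp only
      rw [pvCells, if_neg hsx, min_eq_right (by omega), max_eq_left (by omega), hsy,
        List.foldl_map]
      rfl
    · rw [if_neg (by simpa [pvC] using hgt)]
      dsimp only
      rw [pvCells, if_neg hsx, min_eq_left (by omega), max_eq_right (by omega),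
        List.foldl_map]
      rfl

theorem pvMax?_cons : ∀ (xs : List Int) (m : Int),
    PySem.List.max? (m :: xs) (fun c => c) = some (xs.foldl max m) := by
  intro xs
  induction xs with
  | nil => intro m; rfl
  | cons x xs ih =>
    intro m
    have h2 : PySem.List.max? (m :: x :: xs) (fun c => c)
        = PySem.List.max? (max m x :: xs) (fun c => c) := by
      unfold PySem.List.max?
      simp only [List.foldl_cons]
      congr 1
      rcases lt_or_ge m x with h | h
      · simp [if_pos h, max_eq_right (le_of_lt h)]
      · simp [if_neg (not_lt.mpr h), max_eq_left h]
    rw [h2, ih (max m x), List.foldl_cons]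

theorem pvSizeA_eq (segs : List (List (List (String × Int)))) : ∀ s : Int,
    segs.foldl (fun s line =>
      max (max (max (max s (pvC line 0 "x")) (pvC line 0 "y")) (pvC line 1 "x")) (pvC line 1 "y")) s
    = (pvFlat segs).foldl max s := by
  induction segs with
  | nil => intro s; rfl
  | cons l segs ih =>
    intro s
    rw [pvFlat, List.flatMap_cons, List.foldl_append, List.foldl_cons, ← pvFlat, ih]
    rfl

theorem pvFoldl_append_const {α β : Type} (l : List α) (x : β) :
    ∀ acc : List β, l.foldl (fun acc _ => acc ++ [x]) acc = acc ++ List.replicate l.length x := by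
  induction l with
  | nil => intro acc; simp
  | cons a l ih =>
    intro acc
    rw [List.foldl_cons, ih, List.length_cons, List.replicate_succ', List.append_assoc]
    congr 1
    rw [List.singleton_append, ← List.replicate_succ, List.replicate_succ']

theorem pvVal_zero (m : Nat) (x y : Int) (hx : 0 ≤ x) (hy : 0 ≤ y) :
    pvVal (List.replicate m (List.replicate m (0 : Int))) x y = 0 := by
  unfold pvVal
  rw [show y = ((y.toNat : Nat) : Int) from (Int.toNat_of_nonneg hy).symm,
    show x = ((x.toNat : Nat) : Int) from (Int.toNat_of_nonneg hx).symm,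
    PySem.List.pyGetD_natCast, PySem.List.pyGetD_natCast]
  by_cases hym : y.toNat < m
  · rw [List.getD_eq_getElem (List.replicate m (List.replicate m (0 : Int))) [] (by simpa using hym),
      List.getElem_replicate]
    by_cases hxm : x.toNat < m
    · rw [List.getD_eq_getElem _ _ (by simpa using hxm), List.getElem_replicate]
    · exact List.getD_eq_default _ _ (by simpa using not_lt.mp hxm)
  · rw [List.getD_eq_default (List.replicate m (List.replicate m (0 : Int))) [] (by simpa using not_lt.mp hym)]
    rfl

theorem pvALoop (segs : List (List (List (String × Int))))
    (hk : ∀ l ∈ segs, pvKept l = true) (dg : List (List Int)) :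
    segs.foldl (fun dg line =>
      let left := pvPt line 0
      let right := pvPt line 1
      let same_x := pvKey left "x" == pvKey right "x"
      let lr :=
        if same_x && decide (pvKey left "y" > pvKey right "y") then (right, left)
        else if (!same_x) && decide (pvKey left "x" > pvKey right "x") then (right, left)
        else (left, right)
      if same_x then
        (PySem.List.pyRange (pvKey lr.1 "y") (pvKey lr.2 "y" + 1) 1).foldl
          (fun dg i =>
            PySem.List.pySetD dg i
              (PySem.List.pySetD (PySem.List.pyGetD dg i []) (pvKey lr.1 "x")
                (PySem.List.pyGetD (PySem.List.pyGetD dg i []) (pvKey lr.1 "x") 0 + 1))) dg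
      else
        (PySem.List.pyRange (pvKey lr.1 "x") (pvKey lr.2 "x" + 1) 1).foldl
          (fun dg i =>
            PySem.List.pySetD dg (pvKey lr.1 "y")
              (PySem.List.pySetD (PySem.List.pyGetD dg (pvKey lr.1 "y") []) i
                (PySem.List.pyGetD (PySem.List.pyGetD dg (pvKey lr.1 "y") []) i 0 + 1))) dg) dg
    = (segs.flatMap pvCells).foldl pvInc dg := by
  rw [List.foldl_flatMap]
  exact PySem.List.foldl_congr_mem segs _ _ dg (fun acc l hl => pvStepA_eq l (hk l hl) acc)

-- count of a fixed cell in a vertical strip of cells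
theorem pvCount_map_range_v (x0 x y a b : Int) :
    List.count (x, y) ((PySem.List.pyRange a b 1).map (fun t => (x0, t)))
      = if x = x0 ∧ a ≤ y ∧ y < b then 1 else 0 := by
  rcases le_or_gt b a with h | h
  · rw [PySem.List.pyRange_one_eq_nil h]
    simp only [List.map_nil, List.count_nil]
    rw [if_neg (by omega)]
  · have hlt : (b - (a+1)).toNat < (b - a).toNat := by omega
    rw [PySem.List.pyRange_one_cons h, List.map_cons, List.count_cons,
      pvCount_map_range_v x0 x y (a+1) b]
    simp only [beq_iff_eq, Prod.mk.injEq]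
    split_ifs <;> omega
termination_by (b - a).toNat

-- count of a fixed cell in a horizontal strip of cells
theorem pvCount_map_range_h (y0 x y a b : Int) :
    List.count (x, y) ((PySem.List.pyRange a b 1).map (fun t => (t, y0)))
      = if y = y0 ∧ a ≤ x ∧ x < b then 1 else 0 := by
  rcases le_or_gt b a with h | h
  · rw [PySem.List.pyRange_one_eq_nil h]
    simp only [List.map_nil, List.count_nil]
    rw [if_neg (by omega)]
  · have hlt : (b - (a+1)).toNat < (b - a).toNat := by omega
    rw [PySem.List.pyRange_one_cons h, List.map_cons, List.count_cons,
      pvCount_map_range_h y0 x y (a+1) b]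
    simp only [beq_iff_eq, Prod.mk.injEq]
    split_ifs <;> omega
termination_by (b - a).toNat

-- per segment: the multiplicity of a cell among its cells is its coverage indicator
theorem pvCount_cells (l : List (List (String × Int))) (x y : Int) :
    List.count (x, y) (pvCells l) = if pvCovers l x y then 1 else 0 := by
  by_cases hsx : pvC l 0 "x" = pvC l 1 "x"
  · rw [pvCells, if_pos hsx, pvCount_map_range_v, pvCovers, if_pos (beq_iff_eq.mpr hsx)]
    simp only [Bool.and_eq_true, beq_iff_eq, decide_eq_true_eq]
    split_ifs <;> omega
  · rw [pvCells, if_neg hsx, pvCount_map_range_h, pvCovers,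
      if_neg (show ¬((pvC l 0 "x" == pvC l 1 "x") = true) by
        simp only [beq_iff_eq]; exact hsx)]
    simp only [Bool.and_eq_true, beq_iff_eq, decide_eq_true_eq]
    split_ifs <;> omega

-- multiplicity over all segments = number of segments covering the cell
theorem pvCount_flatMap (x y : Int) : ∀ segs : List (List (List (String × Int))),
    List.count (x, y) (segs.flatMap pvCells) = segs.countP (fun l => pvCovers l x y) := by
  intro segs
  induction segs with
  | nil => rfl
  | cons l segs ih =>
    rw [List.flatMap_cons, List.count_append, List.countP_cons, ih, pvCount_cells]
    split_ifs <;> omega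

-- B's conditional-sum fold is a countP
theorem pvBFold (x y : Int) : ∀ (segs : List (List (List (String × Int)))) (acc : Int),
    segs.foldl (fun acc l => if pvCovers l x y then acc + 1 else acc) acc
      = acc + ((segs.countP (fun l => pvCovers l x y) : Nat) : Int) := by
  intro segs
  induction segs with
  | nil => intro acc; simp
  | cons l segs ih =>
    intro acc
    rw [List.foldl_cons, ih, List.countP_cons]
    by_cases h : pvCovers l x y
    · rw [if_pos h, if_pos h]; push_cast; ring
    · rw [if_neg h, if_neg h, Nat.add_zero]

-- ===== VERDICT (by name: the statement is the Claim_ definition above) =====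
theorem draw_diagram_spec : Claim_equal_draw_diagram := by
  intro lines _hdom hpre
  unfold Spec_draw_diagram
  simp only [draw_diagram, draw_diagram_alt]
  have hkept : ∀ l ∈ lines.filter pvKept, pvKept l = true :=
    fun l hl => (List.mem_filter.mp hl).2
  have hnn : ∀ l ∈ lines.filter pvKept,
      0 ≤ pvC l 0 "x" ∧ 0 ≤ pvC l 0 "y" ∧ 0 ≤ pvC l 1 "x" ∧ 0 ≤ pvC l 1 "y" := by
    intro l hl
    exact (hpre l (List.mem_filter.mp hl).1).2.2.2.2.2 (hkept l hl)
  rw [pvSizeA_eq (lines.filter pvKept) 0]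
  have hmaxd : PySem.List.maxD
      ((0 : Int) :: (lines.filter pvKept).flatMap
        (fun l => [pvC l 0 "x", pvC l 0 "y", pvC l 1 "x", pvC l 1 "y"])) (fun c => c) 0
      = (pvFlat (lines.filter pvKept)).foldl max 0 := by
    unfold PySem.List.maxD pvFlat
    rw [pvMax?_cons]
    rfl
  rw [hmaxd]
  have hS0 : 0 ≤ (pvFlat (lines.filter pvKept)).foldl max 0 :=
    (PySem.List.le_foldl_max (pvFlat (lines.filter pvKept)) 0).1
  have hSmem : ∀ v ∈ pvFlat (lines.filter pvKept), v ≤ (pvFlat (lines.filter pvKept)).foldl max 0 :=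
    (PySem.List.le_foldl_max (pvFlat (lines.filter pvKept)) 0).2
  generalize hSdef : (pvFlat (lines.filter pvKept)).foldl max 0 = S at *
  have hrow0 : (PySem.List.pyRange 0 (S + 1) 1).foldl (fun row _ => row ++ [(0 : Int)]) []
      = List.replicate (S + 1 - 0).toNat 0 := by
    rw [pvFoldl_append_const, PySem.List.length_pyRange_one, List.nil_append]
  simp only [hrow0]
  rw [pvFoldl_append_const, PySem.List.length_pyRange_one, List.nil_append]
  rw [pvALoop (lines.filter pvKept) hkept]
  have hwf0 : pvWF (S + 1 - 0).toNat
      (List.replicate (S + 1 - 0).toNat (List.replicate (S + 1 - 0).toNat (0 : Int))) :=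
    ⟨List.length_replicate, fun r hr => by
      rw [List.eq_of_mem_replicate hr]; exact List.length_replicate⟩
  have hcb : ∀ c ∈ (lines.filter pvKept).flatMap pvCells,
      0 ≤ c.1 ∧ c.1 < (((S + 1 - 0).toNat : Nat) : Int) ∧
      0 ≤ c.2 ∧ c.2 < (((S + 1 - 0).toNat : Nat) : Int) := by
    intro c hc
    obtain ⟨l, hl, hcl⟩ := List.mem_flatMap.mp hc
    obtain ⟨h1, h2, h3, h4⟩ := hnn l hl
    have m1 : pvC l 0 "x" ≤ S := by
      exact hSmem (pvC l 0 "x") (by unfold pvFlat; exact List.mem_flatMap.mpr ⟨l, hl, by simp⟩)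
    have m2 : pvC l 0 "y" ≤ S := by
      exact hSmem (pvC l 0 "y") (by unfold pvFlat; exact List.mem_flatMap.mpr ⟨l, hl, by simp⟩)
    have m3 : pvC l 1 "x" ≤ S := by
      exact hSmem (pvC l 1 "x") (by unfold pvFlat; exact List.mem_flatMap.mpr ⟨l, hl, by simp⟩)
    have m4 : pvC l 1 "y" ≤ S := by
      exact hSmem (pvC l 1 "y") (by unfold pvFlat; exact List.mem_flatMap.mpr ⟨l, hl, by simp⟩)
    unfold pvCells at hcl
    split at hcl
    · obtain ⟨yv, hyv, rfl⟩ := List.mem_map.mp hcl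
      have := PySem.List.mem_pyRange_one.mp hyv
      have hc1 : (((S + 1 - 0).toNat : Nat) : Int) = S + 1 := by omega
      dsimp only
      omega
    · obtain ⟨xv, hxv, rfl⟩ := List.mem_map.mp hcl
      have := PySem.List.mem_pyRange_one.mp hxv
      have hc1 : (((S + 1 - 0).toNat : Nat) : Int) = S + 1 := by omega
      dsimp only
      omega
  obtain ⟨⟨hRlen, hRrows⟩, hRval⟩ :=
    pvFoldl_inc ((lines.filter pvKept).flatMap pvCells) _ hwf0 hcb
  apply List.ext_getElem
  · rw [hRlen, List.length_map, PySem.List.length_pyRange_one]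
  · intro i h1 h2
    rw [List.getElem_map, PySem.List.getElem_pyRange_one]
    have hiS : (i : Int) < S + 1 := by
      rw [List.length_map, PySem.List.length_pyRange_one] at h2; omega
    apply List.ext_getElem
    · rw [hRrows _ (List.getElem_mem h1), List.length_map, PySem.List.length_pyRange_one]
    · intro j j1 j2
      rw [List.getElem_map, PySem.List.getElem_pyRange_one]
      have hjS : (j : Int) < S + 1 := by
        rw [List.length_map, PySem.List.length_pyRange_one] at j2; omega
      have hval : _root_.pvVal
          (((lines.filter pvKept).flatMap pvCells).foldl pvInc
            (List.replicate (S + 1 - 0).toNat (List.replicate (S + 1 - 0).toNat (0 : Int))))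
          (j : Int) (i : Int)
          = ((((lines.filter pvKept).flatMap pvCells).foldl pvInc
              (List.replicate (S + 1 - 0).toNat (List.replicate (S + 1 - 0).toNat (0 : Int))))[i]'h1)[j]'j1 := by
        unfold pvVal
        rw [PySem.List.pyGetD_natCast, PySem.List.pyGetD_natCast,
          List.getD_eq_getElem _ _ h1, List.getD_eq_getElem _ _ j1]
      simp only [zero_add]
      rw [pvBFold (j : Int) (i : Int), ← hval,
        hRval (j : Int) (i : Int) (by omega) (by omega), pvVal_zero _ _ _ (by omega) (by omega),
        pvCount_flatMap]
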